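-- pv_equiv track=rewrite | github.com/msuhuh/slutkursen | Hammock_scripts/Map_motifs.py | n_set
-- ===== SOURCE A (Python) =====
-- def n_set(motif):
--     if motif == '*': # If motif is empty
--         return 0
--     elif len(motif) == 0: # if motif is empty
--         return 0
--     elif motif[0] == "[": # If motif has [X X X], counts as 1 set amino acid
--         a = 1
--         while motif[a] != "]":
--                 a += 1
--         return 1 + n_set(motif[(a+1):])
--     elif motif[0] == '.': # If motif has ., not a set amino acid
--         return n_set(motif[1:])
--     else: # Else count 1 and go to next position
--         return 1 + n_set(motif[1:])
-- ===== SOURCE B (Python) =====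
-- def n_set(motif):
--     # Single linear scan: one set position per bracket group or plain character;
--     # '.' is skipped; a trailing lone '*' marks the empty motif and is not counted.
--     count = 0
--     i = 0
--     n = len(motif)
--     while i < n:
--         c = motif[i]
--         if c == '*' and i == n - 1:
--             break
--         if c == '[':
--             count += 1
--             i = motif.index(']', i + 1) + 1
--         else:
--             if c != '.':
--                 count += 1
--             i += 1
--     return count
-- ===== Notes on version B (the rewrite author's own statement) =====
-- stated objective: faster
-- what changed: Replaced the recursion that re-slices the remaining string at every position with a single iterative index-based scan keeping a running count, skipping bracket groups via index().
import Mathlib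
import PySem

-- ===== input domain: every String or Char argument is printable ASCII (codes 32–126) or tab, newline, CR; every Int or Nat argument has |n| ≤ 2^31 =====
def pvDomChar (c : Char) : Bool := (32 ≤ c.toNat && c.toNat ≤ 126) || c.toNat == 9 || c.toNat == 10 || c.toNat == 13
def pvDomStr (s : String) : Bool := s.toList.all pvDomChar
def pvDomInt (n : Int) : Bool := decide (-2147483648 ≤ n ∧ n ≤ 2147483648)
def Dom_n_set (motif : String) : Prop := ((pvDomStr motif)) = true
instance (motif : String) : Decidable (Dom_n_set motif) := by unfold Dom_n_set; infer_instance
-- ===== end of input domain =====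

-- B is a single linear scan with an index and a running count (O(n)) in place of
-- A's recursion that re-slices the remaining string at every step (O(n^2)).

-- ===== PORT A =====
-- the 'while motif[a] != "]": a += 1' loop followed by motif[(a+1):]:
-- returns the suffix after the first ']', none = the IndexError of running off the end
def pvScanClose : List Char → Option (List Char)
  | [] => none
  | c :: t => if c = ']' then some t else pvScanClose t

theorem pvTailDropLen (t : List Char) : ((t.dropWhile (· ≠ ']')).tail).length ≤ t.length := by
  have h1 := List.length_tail (l := t.dropWhile (· ≠ ']'))
  have h2 := List.length_dropWhile_le (p := fun x => decide (x ≠ ']')) (l := t)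
  omega

theorem pvScanClose_length : ∀ {t t' : List Char}, pvScanClose t = some t' → t'.length ≤ t.length := by
  intro t
  induction t with
  | nil => intro t' h; simp [pvScanClose] at h
  | cons c t ih =>
    intro t' h
    simp only [pvScanClose] at h
    split at h
    · cases h; simp
    · exact (ih h).trans (by simp)

def nSetA : List Char → Int
  | [] => 0
  | c :: t =>
    if c :: t = ['*'] then 0
    else if c = '[' then
      match h : pvScanClose t with
      | some t' => 1 + nSetA t'
      | none => 0          -- Python raises IndexError here; excluded by Pre_n_set
    else if c = '.' then nSetA t
    else 1 + nSetA t
termination_by s => s.length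
decreasing_by
  · exact Nat.lt_succ_of_le (pvScanClose_length h)
  · simp
  · simp

def n_set (motif : String) : Int := nSetA motif.toList

-- ===== PORT B =====
-- Source B's while loop over index i with accumulator count, phrased over the remaining suffix;
-- 'motif.index(']', i+1) + 1' becomes dropping through the first ']'
def nSetAltLoop : List Char → Int → Int
  | [], count => count
  | c :: t, count =>
    if c = '*' ∧ t = [] then count
    else if c = '[' then nSetAltLoop ((t.dropWhile (· ≠ ']')).tail) (count + 1)
    else nSetAltLoop t (if c = '.' then count else count + 1)
termination_by s _ => s.length
decreasing_by
  · exact Nat.lt_succ_of_le (pvTailDropLen t)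
  · simp

def n_set_alt (motif : String) : Int := nSetAltLoop motif.toList 0

-- ===== PRECONDITION & SPEC =====
-- Pre_ excludes exactly the inputs on which A raises IndexError: a '[' with no ']' anywhere after it.
def Pre_n_set (motif : String) : Prop :=
  ∀ t ∈ motif.toList.tails, t.headD ' ' = '[' → ']' ∈ t.tail
instance (motif : String) : Decidable (Pre_n_set motif) := by unfold Pre_n_set; infer_instance
def pvWitness_n_set : String := "A[BC].D*"
def Spec_n_set (motif : String) (out : Int) : Prop := out = n_set_alt motif
instance (motif : String) (out : Int) : Decidable (Spec_n_set motif out) := by unfold Spec_n_set; infer_instance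

-- ===== CLAIM (what is proved, stated in full; the proofs are below) =====
def Claim_equal_n_set : Prop := ∀ (motif : String), Dom_n_set motif → Pre_n_set motif → Spec_n_set motif (n_set motif)

-- ===== LEMMAS AND PROOFS =====

def PreL (l : List Char) : Prop := ∀ t ∈ l.tails, t.headD ' ' = '[' → ']' ∈ t.tail

theorem preL_suffix {l t : List Char} (h : PreL l) (hs : t <:+ l) : PreL t := by
  intro u hu
  exact h u ((List.mem_tails _ _).2 (((List.mem_tails _ _).1 hu).trans hs))

theorem scanClose_of_mem {t : List Char} (h : ']' ∈ t) :
    pvScanClose t = some ((t.dropWhile (· ≠ ']')).tail) := by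
  induction t with
  | nil => cases h
  | cons c t ih =>
    by_cases hc : c = ']'
    · subst hc; simp [pvScanClose, List.dropWhile]
    · have h' : ']' ∈ t := by
        cases List.mem_cons.1 h with
        | inl h0 => exact absurd h0.symm hc
        | inr h0 => exact h0
      simp [pvScanClose, List.dropWhile, hc, ih h']

theorem scanClose_suffix {t : List Char} : (t.dropWhile (· ≠ ']')).tail <:+ t :=
  (List.tail_suffix _).trans (List.dropWhile_suffix _)

theorem main_lemma : ∀ n (l : List Char), l.length ≤ n → PreL l →
    ∀ count : Int, nSetAltLoop l count = count + nSetA l := by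
  intro n
  induction n with
  | zero =>
    intro l hl _ count
    have : l = [] := List.eq_nil_of_length_eq_zero (Nat.le_zero.1 hl)
    subst this; simp [nSetAltLoop, nSetA]
  | succ n ih =>
    intro l hl hpre count
    match l with
    | [] => simp [nSetAltLoop, nSetA]
    | c :: t =>
      by_cases hstar : c = '*' ∧ t = []
      · have : c :: t = ['*'] := by rw [hstar.1, hstar.2]
        simp [nSetAltLoop, nSetA, hstar]
      · have hne : ¬ (c :: t = ['*']) := by
          intro h; apply hstar; exact ⟨(List.cons.injEq _ _ _ _ ▸ h).1, (List.cons.injEq _ _ _ _ ▸ h).2⟩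
        have ht : t.length ≤ n := Nat.lt_succ_iff.1 (by simpa using hl)
        by_cases hbr : c = '['
        · -- bracket group: Pre gives a ']' in t
          have hmem : ']' ∈ t := by
            have := hpre (c :: t) ((List.mem_tails _ _).2 (List.suffix_refl _)) (by simp [hbr])
            simpa using this
          have hscan := scanClose_of_mem hmem
          set t' := (t.dropWhile (· ≠ ']')).tail with ht'
          have ht'len : t'.length ≤ n := (pvTailDropLen t).trans ht
          have hpre' : PreL t' := preL_suffix hpre (scanClose_suffix.trans (List.suffix_cons _ _))
          have hA : nSetA (c :: t) = 1 + nSetA t' := by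
            rw [nSetA]
            rw [if_neg hne]
            rw [if_pos hbr]
            split
            · next t'' heq => rw [hscan] at heq; cases heq; rfl
            · next heq => rw [hscan] at heq; cases heq
          have hB : nSetAltLoop (c :: t) count = nSetAltLoop t' (count + 1) := by
            rw [nSetAltLoop]; simp only [hbr, ht']
            simp
          rw [hA, hB, ih t' ht'len hpre' (count + 1)]; ring
        · have hpre' : PreL t := preL_suffix hpre (List.suffix_cons _ _)
          by_cases hdot : c = '.'
          · have hA : nSetA (c :: t) = nSetA t := by
              rw [nSetA]; simp [hbr, hdot]
            have hB : nSetAltLoop (c :: t) count = nSetAltLoop t count := by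
              rw [nSetAltLoop]; simp [hbr, hdot]
            rw [hA, hB, ih t ht hpre' count]
          · have hA : nSetA (c :: t) = 1 + nSetA t := by
              rw [nSetA]; simp [hne, hbr, hdot]
            have hB : nSetAltLoop (c :: t) count = nSetAltLoop t (count + 1) := by
              rw [nSetAltLoop]; simp [hstar, hbr, hdot]
            rw [hA, hB, ih t ht hpre' (count + 1)]; ring

-- ===== VERDICT (by name: the statement is the Claim_ definition above) =====
theorem n_set_spec : Claim_equal_n_set := by
  intro motif _ hpre
  unfold Spec_n_set n_set n_set_alt
  have := main_lemma motif.toList.length motif.toList le_rfl hpre 0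
  rw [this]; ring
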